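-- pv_equiv track=rewrite | github.com/PrinceSinghhub/GFG-Questions | Minimum sum.py | solve
-- ===== SOURCE A (Python) =====
-- def solve(arr, n):
--     arr.sort()
--     d=d1=0
--     s=s1=""
--     for i in range(n):
--         if(i%2==0):
--             #s=s+str(arr[i])
--             d=d*10 +arr[i]
--         else:
--             #s1=s1+str(arr[i])
--             d1=d1*10 +arr[i]
--     #if(s1==""):
--        # return int(s)
--     #if(s==""):
--      #   return int(s1)
--
--     return d+d1
-- ===== SOURCE B (Python) =====
-- def solve(arr, n):
--     arr.sort()
--     total = 0
--     place = 1
--     i = n - 1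
--     while i >= 0:
--         total += arr[i] * place
--         if i >= 1:
--             total += arr[i - 1] * place
--         place *= 10
--         i -= 2
--     return total
-- ===== Notes on version B (the rewrite author's own statement) =====
-- stated objective: alternative
-- what changed: After sorting, B walks the first n elements back-to-front two at a time, accumulating a single sum with one running place value, instead of A's forward loop with a parity branch maintaining two Horner accumulators.
-- outside the precondition, e.g. on solve([1, 2], 3): A raises IndexError, B raises IndexError
import Mathlib
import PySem

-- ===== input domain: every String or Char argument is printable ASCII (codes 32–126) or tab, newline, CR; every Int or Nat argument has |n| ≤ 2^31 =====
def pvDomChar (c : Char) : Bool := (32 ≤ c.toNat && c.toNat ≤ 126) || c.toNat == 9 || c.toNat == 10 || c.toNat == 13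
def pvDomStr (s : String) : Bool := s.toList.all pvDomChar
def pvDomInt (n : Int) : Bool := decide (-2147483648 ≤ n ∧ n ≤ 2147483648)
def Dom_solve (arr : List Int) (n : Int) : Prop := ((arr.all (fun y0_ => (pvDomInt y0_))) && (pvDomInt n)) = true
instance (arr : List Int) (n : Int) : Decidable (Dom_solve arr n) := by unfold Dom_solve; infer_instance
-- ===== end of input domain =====

-- B replaces A's forward Horner loop (two accumulators, parity branch) by a single
-- back-to-front pairwise accumulation with one running place value; same cost, the
-- equivalence about the RETURN value (both versions sort the list in place in Python).

-- ===== PORT A =====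
def solve (arr : List Int) (n : Int) : Int :=
  let a := PySem.List.sorted arr (fun x => x) false
  let st := (PySem.List.pyRange 0 n 1).foldl
    (fun (p : Int × Int) i =>
      if PySem.Int.mod i 2 == 0 then (p.1 * 10 + (PySem.List.pyGet? a i).getD 0, p.2)
      else (p.1, p.2 * 10 + (PySem.List.pyGet? a i).getD 0)) (0, 0)
  st.1 + st.2

-- ===== PORT B =====
-- the while loop of Source B: i counts down by 2, `total` and `place` are the loop state
def solveAltLoop (a : List Int) (i total place : Int) : Int :=
  if h : 0 ≤ i then
    let t1 := total + (PySem.List.pyGet? a i).getD 0 * place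
    let t2 := if 1 ≤ i then t1 + (PySem.List.pyGet? a (i - 1)).getD 0 * place else t1
    solveAltLoop a (i - 2) t2 (place * 10)
  else total
termination_by (i + 2).toNat
decreasing_by omega

def solve_alt (arr : List Int) (n : Int) : Int :=
  let a := PySem.List.sorted arr (fun x => x) false
  solveAltLoop a (n - 1) 0 1

-- ===== PRECONDITION & SPEC =====
-- Pre_ excludes exactly the inputs where the Python A raises IndexError (arr[i] with n > len(arr)).
def Pre_solve (arr : List Int) (n : Int) : Prop := n ≤ (arr.length : Int)
instance (arr : List Int) (n : Int) : Decidable (Pre_solve arr n) := by unfold Pre_solve; infer_instance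
def pvWitness_solve : List Int × Int := ([6, 8, 4, 5, 2, 3], 6)
def Spec_solve (arr : List Int) (n : Int) (out : Int) : Prop := out = solve_alt arr n
instance (arr : List Int) (n : Int) (out : Int) : Decidable (Spec_solve arr n out) := by unfold Spec_solve; infer_instance

-- ===== CLAIM (what is proved, stated in full; the proofs are below) =====
def Claim_equal_solve : Prop := ∀ (arr : List Int) (n : Int), Dom_solve arr n → Pre_solve arr n → Spec_solve arr n (solve arr n)

-- ===== LEMMAS AND PROOFS =====

-- A's loop body, recursively over the number of processed indices
def hornerPair (a : List Int) : Nat → Int × Int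
  | 0 => (0, 0)
  | m + 1 =>
    let p := hornerPair a m
    let x := (PySem.List.pyGet? a (m : Int)).getD 0
    if PySem.Int.mod (m : Int) 2 == 0 then (p.1 * 10 + x, p.2) else (p.1, p.2 * 10 + x)

lemma fold_eq_hornerPair (a : List Int) (m : Nat) :
    (PySem.List.pyRange 0 (m : Int) 1).foldl
      (fun (p : Int × Int) i =>
        if PySem.Int.mod i 2 == 0 then (p.1 * 10 + (PySem.List.pyGet? a i).getD 0, p.2)
        else (p.1, p.2 * 10 + (PySem.List.pyGet? a i).getD 0)) (0, 0) = hornerPair a m := by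
  induction m with
  | zero => simp [PySem.List.pyRange_one_eq_nil, hornerPair]
  | succ k ih =>
    have : ((k : Int) + 1) = ((k + 1 : Nat) : Int) := by push_cast; ring
    rw [hornerPair, ← this, PySem.List.pyRange_one_succ_right (by positivity),
      List.foldl_append, ih]
    simp [List.foldl]

lemma solveAltLoop_neg (a : List Int) (i t p : Int) (h : i < 0) : solveAltLoop a i t p = t := by
  rw [solveAltLoop, dif_neg (by omega)]

lemma mod_two_flip (m : Nat) :
    (PySem.Int.mod ((m : Int) + 1) 2 == 0) = !(PySem.Int.mod (m : Int) 2 == 0) := by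
  have h1 : PySem.Int.mod (m : Int) 2 = (m : Int) % 2 :=
    PySem.Int.mod_eq_emod_of_pos (by omega)
  have h2 : PySem.Int.mod ((m : Int) + 1) 2 = ((m : Int) + 1) % 2 :=
    PySem.Int.mod_eq_emod_of_pos (by omega)
  rw [h1, h2]
  rcases Int.emod_two_eq (m : Int) with h | h <;> simp [h] <;> omega

-- the key invariant: the backward pairwise loop starting at m-1 adds place * (d + d1)
lemma loop_eq_horner (a : List Int) :
    ∀ m : Nat, ∀ t p : Int,
      solveAltLoop a ((m : Int) - 1) t p = t + p * ((hornerPair a m).1 + (hornerPair a m).2)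
  | 0, t, p => by rw [solveAltLoop]; simp [hornerPair]
  | 1, t, p => by
    rw [solveAltLoop]
    norm_num [solveAltLoop_neg a (-2) _ _ (by omega)]
    simp [hornerPair, PySem.Int.mod]
    ring
  | (m + 2), t, p => by
    have ih := loop_eq_horner a m
    rw [solveAltLoop]
    have hm1 : ((m + 2 : Nat) : Int) - 1 - 2 = (m : Int) - 1 := by push_cast; ring
    have hge : 0 ≤ ((m + 2 : Nat) : Int) - 1 := by push_cast; omega
    have h1 : (1 : Int) ≤ ((m + 2 : Nat) : Int) - 1 := by push_cast; omega
    rw [dif_pos hge]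
    simp only [h1, if_pos, hm1, ih]
    have hA : ((m + 2 : Nat) : Int) - 1 = ((m + 1 : Nat) : Int) := by push_cast; ring
    have hB : ((m + 1 : Nat) : Int) - 1 = ((m : Int)) := by push_cast; ring
    show t + (PySem.List.pyGet? a (((m + 2 : Nat) : Int) - 1)).getD 0 * p +
        (PySem.List.pyGet? a (((m + 2 : Nat) : Int) - 1 - 1)).getD 0 * p +
        p * 10 * ((hornerPair a m).1 + (hornerPair a m).2) = _
    rw [hA, hB]
    show _ = t + p * ((hornerPair a (m + 1 + 1)).1 + (hornerPair a (m + 1 + 1)).2)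
    rw [hornerPair]
    simp only [hornerPair]
    have hc : ((m + 1 : Nat) : Int) = (m : Int) + 1 := by push_cast; ring
    rw [hc, mod_two_flip]
    cases hb : (PySem.Int.mod (m : Int) 2 == 0) <;> simp <;> ring

-- ===== VERDICT (by name: the statement is the Claim_ definition above) =====
theorem solve_spec : Claim_equal_solve := by
  intro arr n _ _
  simp only [Spec_solve, solve, solve_alt]
  by_cases hn : 0 ≤ n
  · obtain ⟨m, rfl⟩ := Int.eq_ofNat_of_zero_le hn
    rw [fold_eq_hornerPair, loop_eq_horner]
    ring
  · rw [PySem.List.pyRange_one_eq_nil (by omega), solveAltLoop_neg _ _ _ _ (by omega)]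
    simp
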